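-- pv_equiv track=rewrite | github.com/StammetC/BuchiAutomata_for_GNN | BA_forGNN_Generator.py | get_minimal_distances_to_acc
-- ===== SOURCE A (Python) =====
-- from typing import Tuple
--
-- def get_minimal_distance(edge_in: list, edge_out: list, s1: int, s2: int) -> int:
--     """
--     Takes as input two lists describing the edge relations of an automaton (using the conventions used
--     by the torch_geometric.data.Data class and returns the minimal distance between
--     the two given nodes s1 and s2 using a breath first search algorithm.
--     -1 is returned as a distance if s1 and s2 are not connected.
--
--     :param edge_in: first list from 'edge_index' tensor from the torch_geometric.data.Data class
--     :param edge_out: second list from 'edge_index' tensor from the torch_geometric.data.Data class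
--     :param s1: integer number of a node in edge list (start of searched path)
--     :param s2: integer number of a node in edge list (goal of searched path)
--     :return: integer denoting the minimal distance between nodes s1 and s2 ('-1' if s1 and s2 are not connected)
--     """
--     dist = 1
--     done = []
--     # dist_hop denotes the list of all nodes that are 'dist' away from s1
--     dist_hop = [s1]
--     # distplusone_hop is the list of all nodes that are 'dist'+1 away from s1
--     distplusone_hop = []
--     # a safety measure while loop - distance cannot be longer than the total number of edges
--     while dist <= len(edge_in):
--         for s in dist_hop:
--             done.append(s)
--             # computes the list of all direct successors of s
--             occurrences = lambda s, lst: (i for i, e in enumerate(lst) if e == s)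
--             all_succ = set([edge_out[i] for i in occurrences(s, edge_in)])
--             # check for each successor if it 1) is the goal state s2 or 2) has already been treated by the algorithm
--             for succ in all_succ:
--                 if succ == s2:
--                     return dist
--                 elif not (succ in done) and not (succ in distplusone_hop):
--                     distplusone_hop.append(succ)
--         # jumping one step forward - next run of the while loop, all treated states' distance increases by 1
--         dist += 1
--         dist_hop = distplusone_hop
--         distplusone_hop = []
--     return -1
--
-- def get_minimal_distances_to_acc(edge_in: list, edge_out: list, acc: list) -> Tuple[int, int]:
--     """
--     Takes as input two lists describing the edge relations of an automaton (using the conventions used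
--     by the torch_geometric.data.Data class and returns both the minimal distance from the initial state
--     to an accepting state as well as the minimal distance from any accepting state to itself.
--
--     :param edge_in: first list from 'edge_index' tensor from the torch_geometric.data.Data class
--     :param edge_out: second list from 'edge_index' tensor from the torch_geometric.data.Data class
--     :param acc: list of accepting states of given automaton
--     :return: integer denoting the minimal distance between initial and any accepting state (-1 if not (self-)reachable)
--     """
--     if 0 in acc:
--         to_acc = 0
--     else:
--         to_acc = len(edge_in) + 1
--     cycle_acc = len(edge_in) + 1
--     for a in acc:
--         x = get_minimal_distance(edge_in, edge_out, 0, a)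
--         y = get_minimal_distance(edge_in, edge_out, a, a)
--         if 0 <= x < to_acc and not (y == -1):
--             to_acc = x
--         if 0 <= y < cycle_acc and not (x == -1):
--             cycle_acc = y
--     if to_acc == len(edge_in) + 1:
--         to_acc = -1
--     if cycle_acc == len(edge_in) + 1:
--         cycle_acc = -1
--     return to_acc, cycle_acc
-- ===== SOURCE B (Python) =====
-- def get_minimal_distances_to_acc(edge_in: list, edge_out: list, acc: list):
--     n = len(edge_in)
--     edges = list(zip(edge_in, edge_out))
--
--     def dists_from(src):
--         # d[v] = length of a shortest walk with at least one edge from src to v,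
--         # among walks of at most n edges (a shortest walk never needs more).
--         d = {}
--         for u, v in edges:
--             if u == src and v not in d:
--                 d[v] = 1
--         for _ in range(n - 1):
--             new = dict(d)
--             for u, v in edges:
--                 if u in d and (v not in new or d[u] + 1 < new[v]):
--                     new[v] = d[u] + 1
--             if new == d:
--                 break
--             d = new
--         return d
--
--     d0 = dists_from(0)
--     best_to = None
--     best_cyc = None
--     for a in acc:
--         x = d0.get(a)
--         y = dists_from(a).get(a)
--         if x is not None and y is not None:
--             if best_to is None or x < best_to:
--                 best_to = x
--             if best_cyc is None or y < best_cyc: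
--                 best_cyc = y
--     to_acc = 0 if 0 in acc else (best_to if best_to is not None else -1)
--     cycle_acc = best_cyc if best_cyc is not None else -1
--     return to_acc, cycle_acc
-- ===== Notes on version B (the rewrite author's own statement) =====
-- stated objective: faster
-- what changed: A runs a fresh breadth-first search (rescanning the whole edge list for every frontier node) from 0 to a and from a to a for every accepting state a; B instead computes a whole shortest-walk distance map per source with a Bellman-Ford-style dynamic program over the zipped edge list with an early fixpoint exit, computes the map from state 0 only once and reuses it for all accepting states.
-- outside the precondition, e.g. on get_minimal_distances_to_acc([5], [], [1]): A returns (-1, -1), B returns (-1, -1); on get_minimal_distances_to_acc([0], [], [1]): A raises IndexError, B returns (-1, -1)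
import Mathlib
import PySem

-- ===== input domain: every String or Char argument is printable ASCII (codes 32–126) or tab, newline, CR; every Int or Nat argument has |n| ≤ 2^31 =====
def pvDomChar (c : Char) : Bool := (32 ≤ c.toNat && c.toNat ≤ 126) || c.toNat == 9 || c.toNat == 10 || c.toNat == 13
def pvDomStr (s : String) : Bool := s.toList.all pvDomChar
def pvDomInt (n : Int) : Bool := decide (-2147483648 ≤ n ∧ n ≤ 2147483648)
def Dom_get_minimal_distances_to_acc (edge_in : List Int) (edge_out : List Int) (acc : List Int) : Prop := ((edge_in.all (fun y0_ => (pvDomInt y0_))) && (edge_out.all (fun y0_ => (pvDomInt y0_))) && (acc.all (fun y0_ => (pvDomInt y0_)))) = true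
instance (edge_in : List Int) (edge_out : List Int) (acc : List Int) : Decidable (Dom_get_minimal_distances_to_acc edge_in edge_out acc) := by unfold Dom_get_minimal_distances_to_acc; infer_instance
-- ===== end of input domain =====

-- B replaces A's per-pair breadth-first searches (which rescan the whole edge list for every
-- frontier node, and re-run the full search from state 0 for every accepting state) by a
-- Bellman-Ford-style dynamic program over the zipped edge list with an early fixpoint exit,
-- computing each source's whole distance map at once and reusing the map from 0 for all
-- accepting states.


-- ===== PORT A =====

-- [edge_out[i] for i in occurrences(s, edge_in)]; every index is in range under Pre_
def pvOcc (edge_in : List Int) (edge_out : List Int) (s : Int) : List Int :=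
  ((PySem.List.enumerate edge_in).filter (fun p => p.2 == s)).map
    (fun p => PySem.List.pyGetD edge_out p.1 0)

-- 'for succ in all_succ: …' (iterating the set in first-occurrence order; A's returned value is
-- independent of the iteration order, which the proofs establish via walk lengths)
def pvSuccLoop (s2 : Int) (dist : Int) (done : List Int) :
    List Int → List Int → Except Int (List Int)
  | [], dpo => .ok dpo
  | succ :: rest, dpo =>
    if succ == s2 then .error dist
    else if ¬ (succ ∈ done) ∧ ¬ (succ ∈ dpo) then pvSuccLoop s2 dist done rest (dpo ++ [succ])
    else pvSuccLoop s2 dist done rest dpo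

-- 'for s in dist_hop: done.append(s); …'
def pvHopLoop (edge_in : List Int) (edge_out : List Int) (s2 : Int) (dist : Int) :
    List Int → List Int → List Int → Except Int (List Int × List Int)
  | [], done, dpo => .ok (done, dpo)
  | s :: rest, done, dpo =>
    let done' := done ++ [s]
    match pvSuccLoop s2 dist done' (PySem.Set.ofList (pvOcc edge_in edge_out s)) dpo with
    | .error d => .error d
    | .ok dpo' => pvHopLoop edge_in edge_out s2 dist rest done' dpo'

-- 'while dist <= len(edge_in)': dist runs 1,2,…,len(edge_in), i.e. exactly len(edge_in) iterations
def pvWhileA (edge_in : List Int) (edge_out : List Int) (s2 : Int) :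
    Nat → Int → List Int → List Int → Int
  | 0, _, _, _ => -1
  | fuel+1, dist, done, hop =>
    match pvHopLoop edge_in edge_out s2 dist hop done [] with
    | .error d => d
    | .ok (done', dpo) => pvWhileA edge_in edge_out s2 fuel (dist+1) done' dpo

def pvGetMinimalDistance (edge_in : List Int) (edge_out : List Int) (s1 : Int) (s2 : Int) : Int :=
  pvWhileA edge_in edge_out s2 edge_in.length 1 [] [s1]

-- body of 'for a in acc: …' in A
def pvStepA (edge_in : List Int) (edge_out : List Int) (st : Int × Int) (a : Int) : Int × Int :=
  let x := pvGetMinimalDistance edge_in edge_out 0 a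
  let y := pvGetMinimalDistance edge_in edge_out a a
  let t := if 0 ≤ x ∧ x < st.1 ∧ ¬ (y = -1) then x else st.1
  let c := if 0 ≤ y ∧ y < st.2 ∧ ¬ (x = -1) then y else st.2
  (t, c)

def get_minimal_distances_to_acc (edge_in : List Int) (edge_out : List Int) (acc : List Int) : Int × Int :=
  let n1 : Int := (edge_in.length : Int) + 1
  let to0 : Int := if (0 : Int) ∈ acc then 0 else n1
  let st := acc.foldl (pvStepA edge_in edge_out) (to0, n1)
  ((if st.1 = n1 then -1 else st.1), (if st.2 = n1 then -1 else st.2))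

-- ===== PORT B =====

-- 'for u, v in edges: if u == src and v not in d: d[v] = 1'
def pvInit (edges : List (Int × Int)) (src : Int) : PySem.Dict Int Int :=
  edges.foldl (fun d e => if e.1 == src && !(d.contains e.2) then d.insert e.2 1 else d)
    PySem.Dict.empty

-- body of 'for u, v in edges: if u in d and (v not in new or d[u] + 1 < new[v]): new[v] = d[u] + 1'
def pvRelaxStep (d : PySem.Dict Int Int) (nw : PySem.Dict Int Int) (e : Int × Int) :
    PySem.Dict Int Int :=
  match d.get? e.1, nw.get? e.2 with
  | some du, none => nw.insert e.2 (du + 1)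
  | some du, some nv => if du + 1 < nv then nw.insert e.2 (du + 1) else nw
  | none, _ => nw

-- one relaxation round over a frozen copy of d ('new = dict(d); …')
def pvRelax (edges : List (Int × Int)) (d : PySem.Dict Int Int) : PySem.Dict Int Int :=
  edges.foldl (pvRelaxStep d) d

-- 'for _ in range(n - 1): … ; if new == d: break'.  (Python's order-insensitive dict equality
-- coincides here with Dict equality: new starts as a copy of d and is only updated in place or
-- extended at the end, so equal key sets and values force equal item lists.)
def pvRounds (edges : List (Int × Int)) : Nat → PySem.Dict Int Int → PySem.Dict Int Int
  | 0, d => d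
  | k+1, d =>
    let nw := pvRelax edges d
    if nw = d then d else pvRounds edges k nw

def pvDistsFrom (edges : List (Int × Int)) (n : Nat) (src : Int) : PySem.Dict Int Int :=
  pvRounds edges (n - 1) (pvInit edges src)

-- body of 'for a in acc: …' in B
def pvStepB (d0 : PySem.Dict Int Int) (edges : List (Int × Int)) (n : Nat)
    (st : Option Int × Option Int) (a : Int) : Option Int × Option Int :=
  match d0.get? a, (pvDistsFrom edges n a).get? a with
  | some xv, some yv =>
    ((match st.1 with | none => some xv | some b => if xv < b then some xv else some b),
     (match st.2 with | none => some yv | some b => if yv < b then some yv else some b))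
  | _, _ => st

def get_minimal_distances_to_acc_alt (edge_in : List Int) (edge_out : List Int) (acc : List Int) : Int × Int :=
  let n := edge_in.length
  let edges := edge_in.zip edge_out
  let d0 := pvDistsFrom edges n 0
  let st := acc.foldl (pvStepB d0 edges n) (none, none)
  ((if (0 : Int) ∈ acc then 0 else st.1.getD (-1)), st.2.getD (-1))

-- ===== PRECONDITION & SPEC =====

-- Pre_ excludes unequal-length edge lists when acc is nonempty (a torch_geometric edge_index
-- always has two halves of the same length): with edge_out shorter than edge_in, A raises
-- IndexError as soon as a search reaches an edge position beyond edge_out, and merely happens to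
-- return when none is reached.  With acc = [] no search runs, so those inputs stay admitted.
def Pre_get_minimal_distances_to_acc (edge_in : List Int) (edge_out : List Int) (acc : List Int) : Prop :=
  edge_in.length ≤ edge_out.length ∨ acc = []
instance (edge_in : List Int) (edge_out : List Int) (acc : List Int) : Decidable (Pre_get_minimal_distances_to_acc edge_in edge_out acc) := by unfold Pre_get_minimal_distances_to_acc; infer_instance

def pvWitness_get_minimal_distances_to_acc : List Int × List Int × List Int :=
  ([0, 1, 2], [1, 2, 1], [2])

def Spec_get_minimal_distances_to_acc (edge_in : List Int) (edge_out : List Int) (acc : List Int) (out : Int × Int) : Prop := out = get_minimal_distances_to_acc_alt edge_in edge_out acc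
instance (edge_in : List Int) (edge_out : List Int) (acc : List Int) (out : Int × Int) : Decidable (Spec_get_minimal_distances_to_acc edge_in edge_out acc out) := by unfold Spec_get_minimal_distances_to_acc; infer_instance

-- ===== CLAIM (what is proved, stated in full; the proofs are below) =====
def Claim_equal_get_minimal_distances_to_acc : Prop := ∀ (edge_in : List Int) (edge_out : List Int) (acc : List Int), Dom_get_minimal_distances_to_acc edge_in edge_out acc → Pre_get_minimal_distances_to_acc edge_in edge_out acc → Spec_get_minimal_distances_to_acc edge_in edge_out acc (get_minimal_distances_to_acc edge_in edge_out acc)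

-- ===== LEMMAS AND PROOFS =====

-- 'pvW edges src l v' ⇔ there is a walk of exactly l edges from src to v along edges
def pvW (edges : List (Int × Int)) (src : Int) : Nat → Int → Prop
  | 0, v => v = src
  | (k+1), v => ∃ u, pvW edges src k u ∧ (u, v) ∈ edges

-- the specification both searches satisfy: r is the length of a shortest walk of ≥ 1 and
-- ≤ n edges from src to tgt, or -1 if there is none
def pvSpec (edges : List (Int × Int)) (src : Int) (tgt : Int) (n : Nat) (r : Int) : Prop :=
  (r = -1 ∧ ∀ l : Nat, 1 ≤ l → l ≤ n → ¬ pvW edges src l tgt) ∨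
  (∃ l : Nat, r = (l : Int) ∧ 1 ≤ l ∧ l ≤ n ∧ pvW edges src l tgt ∧
     ∀ l' : Nat, 1 ≤ l' → l' ≤ n → pvW edges src l' tgt → l ≤ l')

lemma pvSpec_unique {edges : List (Int × Int)} {src tgt : Int} {n : Nat} {r r' : Int}
    (h : pvSpec edges src tgt n r) (h' : pvSpec edges src tgt n r') : r = r' := by
  rcases h with ⟨h1, h2⟩ | ⟨l, hl, hl1, hln, hw, hmin⟩
  · rcases h' with ⟨h1', _⟩ | ⟨l', hl', hl1', hln', hw', _⟩
    · omega
    · exact absurd hw' (h2 l' hl1' hln')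
  · rcases h' with ⟨h1', h2'⟩ | ⟨l', hl', hl1', hln', hw', hmin'⟩
    · exact absurd hw (h2' l hl1 hln)
    · have := hmin l' hl1' hln' hw'
      have := hmin' l hl1 hln hw
      omega

-- bridge: membership in A's successor lists equals membership in the zipped edge list
lemma pvOcc_mem (edge_in edge_out : List Int) (hpre : edge_in.length ≤ edge_out.length)
    (u v : Int) : v ∈ pvOcc edge_in edge_out u ↔ (u, v) ∈ edge_in.zip edge_out := by
  unfold pvOcc
  simp only [List.mem_map, List.mem_filter, PySem.List.mem_enumerate_iff]
  constructor
  · rintro ⟨p, ⟨⟨k, hk, rfl⟩, hpu⟩, rfl⟩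
    simp only [beq_iff_eq] at hpu
    have hk' : k < edge_out.length := lt_of_lt_of_le hk hpre
    refine List.mem_iff_getElem.mpr ⟨k, by simp [List.length_zip]; omega, ?_⟩
    simp [List.getElem_zip, hpu, PySem.List.pyGetD_natCast, List.getD_eq_getElem?_getD,
      List.getElem?_eq_getElem hk']
  · intro h
    rcases List.mem_iff_getElem.mp h with ⟨k, hklen, hget⟩
    have hk : k < edge_in.length := by simp [List.length_zip] at hklen; omega
    have hk' : k < edge_out.length := by simp [List.length_zip] at hklen; omega
    rw [List.getElem_zip] at hget
    have h1 : edge_in[k] = u := congrArg Prod.fst hget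
    have h2 : edge_out[k] = v := congrArg Prod.snd hget
    refine ⟨((k : Int), edge_in[k]), ⟨⟨k, hk, by simp⟩, by simp [h1]⟩, ?_⟩
    simp [PySem.List.pyGetD_natCast, List.getD_eq_getElem?_getD, List.getElem?_eq_getElem hk', h2]

------------------------------------------------------------------ A side

lemma pvSuccLoop_error {s2 dist : Int} {done : List Int} :
    ∀ (succs dpo : List Int), s2 ∈ succs →
      pvSuccLoop s2 dist done succs dpo = .error dist := by
  intro succs
  induction succs with
  | nil => intro dpo h; simp at h
  | cons x rest ih =>
    intro dpo h
    by_cases hx : x = s2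
    · simp [pvSuccLoop, hx]
    · rcases List.mem_cons.mp h with h' | h'
      · exact absurd h'.symm hx
      · simp only [pvSuccLoop, beq_iff_eq, hx, if_false]
        split <;> exact ih _ h'

lemma pvSuccLoop_ok {s2 dist : Int} {done : List Int} :
    ∀ (succs dpo : List Int), s2 ∉ succs →
      ∃ dpo', pvSuccLoop s2 dist done succs dpo = .ok dpo' ∧
        (∀ v ∈ dpo', v ∈ dpo ∨ v ∈ succs) ∧
        (∀ v ∈ dpo, v ∈ dpo') ∧
        (∀ v ∈ succs, v ∈ done ∨ v ∈ dpo') := by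
  intro succs
  induction succs with
  | nil => intro dpo _; exact ⟨dpo, rfl, fun v hv => .inl hv, fun v hv => hv, fun v hv => by simp at hv⟩
  | cons x rest ih =>
    intro dpo h
    have hx : ¬ x = s2 := by rintro rfl; exact h (List.mem_cons_self)
    have hrest : s2 ∉ rest := fun hr => h (List.mem_cons_of_mem _ hr)
    simp only [pvSuccLoop, beq_iff_eq, if_neg hx]
    split
    · rcases ih (dpo ++ [x]) hrest with ⟨dpo', heq, hsub, hmono, hcov⟩
      refine ⟨dpo', heq, ?_, ?_, ?_⟩
      · intro v hv
        rcases hsub v hv with hv' | hv'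
        · rcases List.mem_append.mp hv' with hv'' | hv''
          · exact .inl hv''
          · exact .inr (by simp at hv''; simp [hv''])
        · exact .inr (List.mem_cons_of_mem _ hv')
      · intro v hv; exact hmono v (List.mem_append_left _ hv)
      · intro v hv
        rcases List.mem_cons.mp hv with rfl | hv'
        · exact .inr (hmono v (List.mem_append_right _ (by simp)))
        · exact hcov v hv'
    · rename_i hcond
      rcases ih dpo hrest with ⟨dpo', heq, hsub, hmono, hcov⟩
      refine ⟨dpo', heq, ?_, hmono, ?_⟩
      · intro v hv
        rcases hsub v hv with hv' | hv'
        · exact .inl hv'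
        · exact .inr (List.mem_cons_of_mem _ hv')
      · intro v hv
        rcases List.mem_cons.mp hv with rfl | hv'
        · by_cases hd : v ∈ done
          · exact .inl hd
          · have hdp : v ∈ dpo := by
              by_contra hdp; exact hcond ⟨hd, hdp⟩
            exact .inr (hmono v hdp)
        · exact hcov v hv'

lemma pvHopLoop_error (edge_in edge_out : List Int) {s2 dist : Int} :
    ∀ (hop done dpo : List Int),
      (∃ s ∈ hop, s2 ∈ pvOcc edge_in edge_out s) →
      pvHopLoop edge_in edge_out s2 dist hop done dpo = .error dist := by
  intro hop
  induction hop with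
  | nil => rintro done dpo ⟨s, hs, _⟩; simp at hs
  | cons x rest ih =>
    rintro done dpo ⟨s, hs, hocc⟩
    by_cases hmem : s2 ∈ pvOcc edge_in edge_out x
    · have := pvSuccLoop_error (done := done ++ [x]) (dist := dist)
        (PySem.Set.ofList (pvOcc edge_in edge_out x)) dpo
        (by rw [PySem.Set.mem_ofList]; exact hmem)
      simp [pvHopLoop, this]
    · rcases List.mem_cons.mp hs with rfl | hs'
      · exact absurd hocc hmem
      · rcases pvSuccLoop_ok (done := done ++ [x]) (dist := dist)
          (PySem.Set.ofList (pvOcc edge_in edge_out x)) dpo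
          (by rw [PySem.Set.mem_ofList]; exact hmem) with ⟨dpo', heq, _, _, _⟩
        simp only [pvHopLoop, heq]
        exact ih _ _ ⟨s, hs', hocc⟩

lemma pvHopLoop_ok (edge_in edge_out : List Int) {s2 dist : Int} :
    ∀ (hop done dpo : List Int),
      (∀ s ∈ hop, s2 ∉ pvOcc edge_in edge_out s) →
      ∃ dpo', pvHopLoop edge_in edge_out s2 dist hop done dpo = .ok (done ++ hop, dpo') ∧
        (∀ v ∈ dpo', v ∈ dpo ∨ ∃ s ∈ hop, v ∈ pvOcc edge_in edge_out s) ∧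
        (∀ v ∈ dpo, v ∈ dpo') ∧
        (∀ s ∈ hop, ∀ v ∈ pvOcc edge_in edge_out s, v ∈ done ∨ v ∈ hop ∨ v ∈ dpo') := by
  intro hop
  induction hop with
  | nil =>
    intro done dpo _
    exact ⟨dpo, by simp [pvHopLoop], fun v hv => .inl hv, fun v hv => hv, fun s hs => by simp at hs⟩
  | cons x rest ih =>
    intro done dpo h
    have hx := h x List.mem_cons_self
    rcases pvSuccLoop_ok (done := done ++ [x]) (dist := dist)
        (PySem.Set.ofList (pvOcc edge_in edge_out x)) dpo
        (by rw [PySem.Set.mem_ofList]; exact hx) with ⟨dpo1, heq, hsub1, hmono1, hcov1⟩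
    rcases ih (done ++ [x]) dpo1 (fun s hs => h s (List.mem_cons_of_mem _ hs))
      with ⟨dpo', heq', hsub', hmono', hcov'⟩
    refine ⟨dpo', ?_, ?_, ?_, ?_⟩
    · simp only [pvHopLoop, heq, heq']
      simp
    · intro v hv
      rcases hsub' v hv with hv1 | ⟨s, hs, hocc⟩
      · rcases hsub1 v hv1 with hv2 | hv2
        · exact .inl hv2
        · exact .inr ⟨x, List.mem_cons_self, (PySem.Set.mem_ofList _ _).mp hv2⟩
      · exact .inr ⟨s, List.mem_cons_of_mem _ hs, hocc⟩
    · intro v hv; exact hmono' v (hmono1 v hv)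
    · intro s hs v hocc
      rcases List.mem_cons.mp hs with rfl | hs'
      · rcases hcov1 v ((PySem.Set.mem_ofList _ _).mpr hocc) with hv | hv
        · rcases List.mem_append.mp hv with hv' | hv'
          · exact .inl hv'
          · exact .inr (.inl (by simp at hv'; simp [hv']))
        · exact .inr (.inr (hmono' v hv))
      · rcases hcov' s hs' v hocc with hv | hv | hv
        · rcases List.mem_append.mp hv with hv' | hv'
          · exact .inl hv'
          · exact .inr (.inl (by simp at hv'; simp [hv']))
        · exact .inr (.inl (List.mem_cons_of_mem _ hv))
        · exact .inr (.inr hv)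

lemma pvWhileA_spec (edge_in edge_out : List Int)
    (hpre : edge_in.length ≤ edge_out.length) (src tgt : Int) :
    ∀ (fuel d : Nat) (done hop : List Int),
      fuel + d = edge_in.length →
      (∀ v ∈ hop, pvW (edge_in.zip edge_out) src d v) →
      (∀ l : Nat, l ≤ d → ∀ v, pvW (edge_in.zip edge_out) src l v → v ∈ done ∨ v ∈ hop) →
      (∀ l : Nat, 1 ≤ l → l ≤ d → ¬ pvW (edge_in.zip edge_out) src l tgt) →
      (∀ u ∈ done, ∀ v, (u, v) ∈ edge_in.zip edge_out → v ≠ tgt ∧ (v ∈ done ∨ v ∈ hop)) →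
      pvSpec (edge_in.zip edge_out) src tgt edge_in.length
        (pvWhileA edge_in edge_out tgt fuel ((d : Int) + 1) done hop) := by
  intro fuel
  induction fuel with
  | zero =>
    intro d done hop hn _ _ H3 _
    refine .inl ⟨rfl, fun l hl1 hln => H3 l hl1 (by omega)⟩
  | succ fuel ih =>
    intro d done hop hn H1 H2 H3 H4
    by_cases hfound : ∃ s ∈ hop, tgt ∈ pvOcc edge_in edge_out s
    · rw [show pvWhileA edge_in edge_out tgt (fuel+1) ((d:Int)+1) done hop =
          match pvHopLoop edge_in edge_out tgt ((d:Int)+1) hop done [] with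
          | .error dd => dd
          | .ok (done', dpo) => pvWhileA edge_in edge_out tgt fuel ((d:Int)+1+1) done' dpo from rfl,
        pvHopLoop_error edge_in edge_out hop done [] hfound]
      rcases hfound with ⟨s, hs, hocc⟩
      refine .inr ⟨d + 1, by push_cast; ring, by omega, by omega, ?_, ?_⟩
      · exact ⟨s, H1 s hs, (pvOcc_mem edge_in edge_out hpre s tgt).mp hocc⟩
      · intro l' hl1 hln hw
        by_contra hlt
        exact H3 l' hl1 (by omega) hw
    · push Not at hfound
      rcases pvHopLoop_ok edge_in edge_out hop done [] hfound with ⟨dpo', heq, hsub, _, hcov⟩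
      rw [show pvWhileA edge_in edge_out tgt (fuel+1) ((d:Int)+1) done hop =
          match pvHopLoop edge_in edge_out tgt ((d:Int)+1) hop done [] with
          | .error dd => dd
          | .ok (done', dpo) => pvWhileA edge_in edge_out tgt fuel ((d:Int)+1+1) done' dpo from rfl,
        heq]
      have hcast : ((d:Int)+1+1) = ((d+1 : Nat) : Int) + 1 := by push_cast; ring
      rw [hcast]
      apply ih (d+1) (done ++ hop) dpo' (by omega)
      · intro v hv
        rcases hsub v hv with hv' | ⟨s, hs, hocc⟩
        · simp at hv'
        · exact ⟨s, H1 s hs, (pvOcc_mem edge_in edge_out hpre s v).mp hocc⟩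
      · intro l hl v hw
        rcases Nat.lt_or_ge l (d+1) with hld | hld
        · rcases H2 l (by omega) v hw with hv | hv
          · exact .inl (List.mem_append_left _ hv)
          · exact .inl (List.mem_append_right _ hv)
        · have hl' : l = d + 1 := by omega
          subst hl'
          rcases hw with ⟨u, hwu, hedge⟩
          rcases H2 d le_rfl u hwu with hu | hu
          · rcases H4 u hu v hedge with ⟨_, hv | hv⟩
            · exact .inl (List.mem_append_left _ hv)
            · exact .inl (List.mem_append_right _ hv)
          · rcases hcov u hu v ((pvOcc_mem edge_in edge_out hpre u v).mpr hedge) with hv | hv | hv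
            · exact .inl (List.mem_append_left _ hv)
            · exact .inl (List.mem_append_right _ hv)
            · exact .inr hv
      · intro l hl1 hld
        rcases Nat.lt_or_ge l (d+1) with h' | h'
        · exact H3 l hl1 (by omega)
        · have hl' : l = d + 1 := by omega
          subst hl'
          rintro ⟨u, hwu, hedge⟩
          rcases H2 d le_rfl u hwu with hu | hu
          · exact (H4 u hu tgt hedge).1 rfl
          · exact hfound u hu ((pvOcc_mem edge_in edge_out hpre u tgt).mpr hedge)
      · intro u hu v hedge
        have hvnocc := (pvOcc_mem edge_in edge_out hpre u v).mpr hedge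
        rcases List.mem_append.mp hu with hu' | hu'
        · rcases H4 u hu' v hedge with ⟨hne, hv | hv⟩
          · exact ⟨hne, .inl (List.mem_append_left _ hv)⟩
          · exact ⟨hne, .inl (List.mem_append_right _ hv)⟩
        · refine ⟨fun hveq => hfound u hu' (hveq ▸ hvnocc), ?_⟩
          rcases hcov u hu' v hvnocc with hv | hv | hv
          · exact .inl (List.mem_append_left _ hv)
          · exact .inl (List.mem_append_right _ hv)
          · exact .inr hv

lemma pvGetMinimalDistance_spec (edge_in edge_out : List Int)
    (hpre : edge_in.length ≤ edge_out.length) (src tgt : Int) :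
    pvSpec (edge_in.zip edge_out) src tgt edge_in.length
      (pvGetMinimalDistance edge_in edge_out src tgt) := by
  have := pvWhileA_spec edge_in edge_out hpre src tgt edge_in.length 0 [] [src]
    (by omega)
    (by intro v hv; rcases List.mem_singleton.mp hv with rfl; exact rfl)
    (by intro l hl v hw; interval_cases l; exact .inr (List.mem_singleton.mpr hw))
    (by intro l hl1 hl0; omega)
    (by intro u hu; simp at hu)
  simpa using this

------------------------------------------------------------------ B side

-- dictionary invariant of the dynamic program after covering walks of up to k edges
def pvGood (edges : List (Int × Int)) (src : Int) (k : Nat) (d : PySem.Dict Int Int) : Prop :=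
  ∀ v : Int,
    (∀ m : Int, d.get? v = some m →
      ∃ l : Nat, m = (l : Int) ∧ 1 ≤ l ∧ l ≤ k ∧ pvW edges src l v ∧
        (∀ l' : Nat, 1 ≤ l' → pvW edges src l' v → l ≤ l')) ∧
    (d.get? v = none → ∀ l : Nat, 1 ≤ l → l ≤ k → ¬ pvW edges src l v)

lemma pvInit_aux (src : Int) :
    ∀ (es : List (Int × Int)) (d : PySem.Dict Int Int) (v : Int),
      (es.foldl (fun d e => if e.1 == src && !(d.contains e.2) then d.insert e.2 1 else d) d).get? v
        = if d.contains v then d.get? v else if (src, v) ∈ es then some 1 else none := by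
  intro es
  induction es with
  | nil =>
    intro d v
    by_cases h : d.contains v
    · simp [h]
    · simp [h, (PySem.Dict.get?_eq_none_iff_contains d v).mpr (by simp [h])]
  | cons e rest ih =>
    intro d v
    rcases e with ⟨a, b⟩
    simp only [List.foldl_cons]
    rw [ih]
    by_cases ha : a = src
    · by_cases hb : d.contains b
      · have hstep : (a == src && !(d.contains b)) = false := by simp [hb]
        simp only [hstep, Bool.false_eq_true, if_false]
        by_cases hv : d.contains v
        · simp [hv]
        · have hne : ¬ ((src, v) = (a, b)) := by
            rintro h; injection h with h1 h2; subst h2; exact hv hb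
          simp [hv, List.mem_cons, hne]
      · have hstep : (a == src && !(d.contains b)) = true := by simp [ha, hb]
        simp only [hstep, if_true]
        by_cases hv : v = b
        · subst hv
          simp [PySem.Dict.contains_insert_self, PySem.Dict.get?_insert_self,
            hb, List.mem_cons, ha]
        · have hci : (d.insert b 1).contains v = d.contains v := by
            rw [PySem.Dict.contains_insert]
            simp [show (v == b) = false from by simp [hv]]
          rw [hci, PySem.Dict.get?_insert_of_ne (hne := hv)]
          by_cases hcv : d.contains v
          · simp [hcv]
          · have hne : ¬ ((src, v) = (a, b)) := by
              rintro h; injection h with h1 h2; exact hv h2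
            simp [hcv, List.mem_cons, hne]
    · have hstep : (a == src && !(d.contains b)) = false := by simp [ha]
      simp only [hstep, Bool.false_eq_true, if_false]
      by_cases hv : d.contains v
      · simp [hv]
      · have hne : ¬ ((src, v) = (a, b)) := by
          rintro h; injection h with h1 h2; exact ha h1.symm
        simp [hv, List.mem_cons, hne]

lemma pvInit_get (edges : List (Int × Int)) (src : Int) (v : Int) :
    (pvInit edges src).get? v = if (src, v) ∈ edges then some 1 else none := by
  rw [pvInit, pvInit_aux]
  simp

lemma pvRelaxStep_ne (d nw : PySem.Dict Int Int) (e : Int × Int) (v : Int) (hne : v ≠ e.2) :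
    (pvRelaxStep d nw e).get? v = nw.get? v := by
  unfold pvRelaxStep
  cases hd : d.get? e.1 with
  | none => rfl
  | some du =>
    cases hnw : nw.get? e.2 with
    | none => simp [PySem.Dict.get?_insert_of_ne (hne := hne)]
    | some nv =>
      by_cases hlt : du + 1 < nv
      · simp [hlt, PySem.Dict.get?_insert_of_ne (hne := hne)]
      · simp [hlt]

lemma pvRelaxStep_self (d nw : PySem.Dict Int Int) (e : Int × Int) :
    (pvRelaxStep d nw e).get? e.2 = nw.get? e.2 ∨
    ∃ du, d.get? e.1 = some du ∧ (pvRelaxStep d nw e).get? e.2 = some (du + 1) ∧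
      (∀ nv, nw.get? e.2 = some nv → du + 1 ≤ nv) := by
  unfold pvRelaxStep
  cases hd : d.get? e.1 with
  | none => exact .inl rfl
  | some du =>
    cases hnw : nw.get? e.2 with
    | none =>
      refine .inr ⟨du, rfl, by simp [PySem.Dict.get?_insert_self], ?_⟩
      intro nv h; simp at h
    | some nv =>
      by_cases hlt : du + 1 < nv
      · refine .inr ⟨du, rfl, by simp [hlt, PySem.Dict.get?_insert_self], ?_⟩
        intro nv' h; injection h with h; omega
      · simp [hlt, hnw]

-- step at e.2 never increases an existing value, and yields ≤ du + 1 when d has e.1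
lemma pvRelaxStep_le (d nw : PySem.Dict Int Int) (e : Int × Int) (du : Int)
    (hdu : d.get? e.1 = some du) :
    ∃ m'', (pvRelaxStep d nw e).get? e.2 = some m'' ∧ m'' ≤ du + 1 := by
  unfold pvRelaxStep
  rw [hdu]
  cases hnw : nw.get? e.2 with
  | none => exact ⟨du + 1, by simp [PySem.Dict.get?_insert_self], le_refl _⟩
  | some nv =>
    by_cases hlt : du + 1 < nv
    · exact ⟨du + 1, by simp [hlt, PySem.Dict.get?_insert_self], le_refl _⟩
    · exact ⟨nv, by simp [hlt, hnw], by omega⟩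

lemma pvRelax_G2 (d : PySem.Dict Int Int) :
    ∀ (es : List (Int × Int)) (nw : PySem.Dict Int Int) (v : Int) (m : Int),
      nw.get? v = some m →
      ∃ m', (es.foldl (pvRelaxStep d) nw).get? v = some m' ∧ m' ≤ m := by
  intro es
  induction es with
  | nil => intro nw v m h; exact ⟨m, h, le_refl m⟩
  | cons e rest ih =>
    intro nw v m h
    simp only [List.foldl_cons]
    by_cases hv : v = e.2
    · subst hv
      rcases pvRelaxStep_self d nw e with h' | ⟨du, _, h', hle⟩
      · exact ih _ e.2 m (h' ▸ h)
      · rcases ih _ e.2 (du + 1) h' with ⟨m', hm', hle'⟩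
        exact ⟨m', hm', le_trans hle' (hle m h)⟩
    · exact ih _ v m ((pvRelaxStep_ne d nw e v hv) ▸ h)

lemma pvRelax_G1 (d : PySem.Dict Int Int) :
    ∀ (es : List (Int × Int)) (nw : PySem.Dict Int Int) (v : Int) (m : Int),
      (es.foldl (pvRelaxStep d) nw).get? v = some m →
      nw.get? v = some m ∨ ∃ u du, (u, v) ∈ es ∧ d.get? u = some du ∧ m = du + 1 := by
  intro es
  induction es with
  | nil => intro nw v m h; exact .inl h
  | cons e rest ih =>
    intro nw v m h
    simp only [List.foldl_cons] at h
    rcases ih _ v m h with h' | ⟨u, du, hu, hdu, hm⟩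
    · by_cases hv : v = e.2
      · subst hv
        rcases pvRelaxStep_self d nw e with h'' | ⟨du, hdu, h'', _⟩
        · exact .inl (h'' ▸ h')
        · rw [h'] at h''; injection h'' with h''
          exact .inr ⟨e.1, du, List.mem_cons_self, hdu, h''⟩
      · exact .inl ((pvRelaxStep_ne d nw e v hv) ▸ h')
    · exact .inr ⟨u, du, List.mem_cons_of_mem _ hu, hdu, hm⟩

lemma pvRelax_G3 (d : PySem.Dict Int Int) :
    ∀ (es : List (Int × Int)) (nw : PySem.Dict Int Int) (v u : Int) (du : Int),
      (u, v) ∈ es → d.get? u = some du →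
      ∃ m', (es.foldl (pvRelaxStep d) nw).get? v = some m' ∧ m' ≤ du + 1 := by
  intro es
  induction es with
  | nil => intro nw v u du h; simp at h
  | cons e rest ih =>
    intro nw v u du hmem hdu
    simp only [List.foldl_cons]
    rcases List.mem_cons.mp hmem with heq | hrest
    · have hv : v = e.2 := by rw [← heq]
      have he1 : d.get? e.1 = some du := by rw [← heq]; exact hdu
      rcases pvRelaxStep_le d nw e du he1 with ⟨m'', hm'', hle''⟩
      rcases pvRelax_G2 d rest _ e.2 m'' hm'' with ⟨m', hm', hle'⟩
      exact ⟨m', hv ▸ hm', le_trans hle' hle''⟩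
    · exact ih _ v u du hrest hdu

lemma pvW_one (edges : List (Int × Int)) (src v : Int) :
    pvW edges src 1 v ↔ (src, v) ∈ edges := by
  constructor
  · rintro ⟨u, hu, hmem⟩; rw [show u = src from hu] at hmem; exact hmem
  · intro h; exact ⟨src, rfl, h⟩

lemma pvInit_good (edges : List (Int × Int)) (src : Int) :
    pvGood edges src 1 (pvInit edges src) := by
  intro v
  rw [pvInit_get]
  constructor
  · intro m hm
    by_cases h : (src, v) ∈ edges
    · rw [if_pos h] at hm; injection hm with hm
      exact ⟨1, by omega, le_refl _, le_refl _, (pvW_one edges src v).mpr h, fun l' hl' _ => hl'⟩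
    · rw [if_neg h] at hm; cases hm
  · intro hm l hl1 hl2
    by_cases h : (src, v) ∈ edges
    · rw [if_pos h] at hm; cases hm
    · rw [if_neg h] at hm
      have : l = 1 := by omega
      subst this
      rw [pvW_one]
      exact h

lemma pvRelax_good (edges : List (Int × Int)) (src : Int) (k : Nat) (hk : 1 ≤ k)
    (d : PySem.Dict Int Int) (h : pvGood edges src k d) :
    pvGood edges src (k + 1) (pvRelax edges d) := by
  intro v
  -- any walk of length ≤ k forces a stored value ≤ its length
  have hshort : ∀ l' : Nat, 1 ≤ l' → l' ≤ k → pvW edges src l' v →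
      ∃ m', (pvRelax edges d).get? v = some m' ∧ m' ≤ (l' : Int) := by
    intro l' hl1 hlk hw
    cases hdv : d.get? v with
    | none => exact absurd hw ((h v).2 hdv l' hl1 hlk)
    | some mv =>
      rcases (h v).1 mv hdv with ⟨l0, rfl, hl01, _, _, hmin0⟩
      rcases pvRelax_G2 d edges d v _ hdv with ⟨m', hm', hle⟩
      have := hmin0 l' hl1 hw
      exact ⟨m', hm', by omega⟩
  constructor
  · intro m hm
    rcases pvRelax_G1 d edges d v m hm with hdv | ⟨u, du, hedge, hdu, rfl⟩
    · rcases (h v).1 m hdv with ⟨l, hml, hl1, hlk, hwl, hmin⟩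
      exact ⟨l, hml, hl1, by omega, hwl, hmin⟩
    · rcases (h u).1 du hdu with ⟨lu, hdul, hlu1, hluk, hwu, _⟩
      refine ⟨lu + 1, by rw [hdul]; push_cast; ring, by omega, by omega, ⟨u, hwu, hedge⟩, ?_⟩
      intro l' hl1 hw
      by_contra hlt
      have hl'k : l' ≤ k := by omega
      rcases hshort l' hl1 hl'k hw with ⟨m', hm', hle'⟩
      rw [hm] at hm'
      injection hm' with hm'
      subst hm'
      rw [hdul] at hle'
      omega
  · intro hm l hl1 hlk hw
    rcases Nat.lt_or_ge l (k + 1) with hlk' | hlk'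
    · rcases hshort l hl1 (by omega) hw with ⟨m', hm', _⟩
      rw [hm] at hm'
      cases hm'
    · have : l = k + 1 := by omega
      subst this
      rcases hw with ⟨u, hwu, hedge⟩
      cases hdu : d.get? u with
      | none => exact (h u).2 hdu k hk le_rfl hwu
      | some du =>
        rcases pvRelax_G3 d edges d v u du hedge hdu with ⟨m', hm', _⟩
        rw [show (edges.foldl (pvRelaxStep d) d) = pvRelax edges d from rfl, hm] at hm'
        cases hm'

lemma pvRounds_good (edges : List (Int × Int)) (src : Int) :
    ∀ (r : Nat) (k : Nat), 1 ≤ k → ∀ (d : PySem.Dict Int Int), pvGood edges src k d →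
      pvGood edges src (k + r) (pvRounds edges r d) := by
  intro r
  induction r with
  | zero => intro k _ d h; exact h
  | succ r ih =>
    intro k hk d h
    show pvGood edges src (k + (r+1)) (pvRounds edges (r+1) d)
    rw [pvRounds]
    by_cases hfix : pvRelax edges d = d
    · simp only [hfix, if_pos]
      -- a fixpoint stays good at every later index
      have hgen : ∀ j : Nat, pvGood edges src (k + j) d := by
        intro j
        induction j with
        | zero => exact h
        | succ j ihj =>
          have := pvRelax_good edges src (k + j) (by omega) d ihj
          rw [hfix] at this
          exact (by rw [show k + (j+1) = k + j + 1 from rfl]; exact this)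
      exact hgen (r + 1)
    · simp only [if_neg hfix]
      have := ih (k + 1) (by omega) (pvRelax edges d) (pvRelax_good edges src k hk d h)
      rw [show k + 1 + r = k + (r + 1) from by omega] at this
      exact this

-- the stored value (or its absence) at tgt realises pvSpec, with its exact bounds
lemma pvDistsFrom_char (edges : List (Int × Int)) (n : Nat) (hedge : edges.length ≤ n)
    (src tgt : Int) :
    ((pvDistsFrom edges n src).get? tgt = none ∧ pvSpec edges src tgt n (-1)) ∨
    (∃ m : Nat, (pvDistsFrom edges n src).get? tgt = some (m : Int) ∧
       pvSpec edges src tgt n (m : Int) ∧ 1 ≤ m ∧ m ≤ n) := by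
  rcases Nat.eq_zero_or_pos n with rfl | hn
  · have hnil : edges = [] := List.eq_nil_of_length_eq_zero (by omega)
    subst hnil
    exact .inl ⟨rfl, .inl ⟨rfl, fun l hl1 hl0 => by omega⟩⟩
  · have hgood : pvGood edges src n (pvDistsFrom edges n src) := by
      have := pvRounds_good edges src (n - 1) 1 le_rfl (pvInit edges src)
        (pvInit_good edges src)
      rw [show 1 + (n - 1) = n from by omega] at this
      exact this
    cases hget : (pvDistsFrom edges n src).get? tgt with
    | none => exact .inl ⟨rfl, .inl ⟨rfl, (hgood tgt).2 hget⟩⟩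
    | some m =>
      rcases (hgood tgt).1 m hget with ⟨l, hml, hl1, hln, hw, hmin⟩
      subst hml
      exact .inr ⟨l, rfl, .inr ⟨l, rfl, hl1, hln, hw, fun l' h1 _ h3 => hmin l' h1 h3⟩, hl1, hln⟩

------------------------------------------------------------------ assembly

lemma pvVal_rel (edge_in edge_out : List Int) (hpre : edge_in.length ≤ edge_out.length)
    (s t : Int) :
    ((pvDistsFrom (edge_in.zip edge_out) edge_in.length s).get? t = none ∧
       pvGetMinimalDistance edge_in edge_out s t = -1) ∨
    (∃ m : Nat, (pvDistsFrom (edge_in.zip edge_out) edge_in.length s).get? t = some (m : Int) ∧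
       pvGetMinimalDistance edge_in edge_out s t = (m : Int) ∧ 1 ≤ m ∧ m ≤ edge_in.length) := by
  have hA := pvGetMinimalDistance_spec edge_in edge_out hpre s t
  have hedge : (edge_in.zip edge_out).length ≤ edge_in.length := by
    simp [List.length_zip]
  rcases pvDistsFrom_char (edge_in.zip edge_out) edge_in.length hedge s t with
    ⟨hget, hB⟩ | ⟨m, hget, hB, hm1, hmn⟩
  · exact .inl ⟨hget, pvSpec_unique hA hB⟩
  · exact .inr ⟨m, hget, pvSpec_unique hA hB, hm1, hmn⟩

-- relation between A's running minimum (sentinel n+1) and B's Option minimum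
def pvRelV (n : Nat) (t : Int) (bt : Option Int) : Prop :=
  (bt = none ∧ t = (n : Int) + 1) ∨ (∃ m : Nat, bt = some (m : Int) ∧ t = (m : Int) ∧ 1 ≤ m ∧ m ≤ n)

lemma pvFoldT0 (edge_in edge_out : List Int) :
    ∀ (l : List Int) (c : Int), ((l.foldl (pvStepA edge_in edge_out) (0, c))).1 = 0 := by
  intro l
  induction l with
  | nil => intro c; rfl
  | cons a rest ih =>
    intro c
    simp only [List.foldl_cons]
    have hA : pvStepA edge_in edge_out (0, c) a =
        (0, if 0 ≤ pvGetMinimalDistance edge_in edge_out a a ∧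
              pvGetMinimalDistance edge_in edge_out a a < c ∧
              ¬ (pvGetMinimalDistance edge_in edge_out 0 a = -1)
            then pvGetMinimalDistance edge_in edge_out a a else c) := by
      unfold pvStepA
      simp only [Prod.mk.injEq]
      exact ⟨by rw [if_neg (by push Not; intro h1 h2; omega)], trivial⟩
    rw [hA]
    exact ih _

lemma pvFoldT (edge_in edge_out : List Int) (hpre : edge_in.length ≤ edge_out.length) :
    ∀ (l : List Int) (t c : Int) (bt bc : Option Int),
      pvRelV edge_in.length t bt →
      pvRelV edge_in.length
        ((l.foldl (pvStepA edge_in edge_out) (t, c))).1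
        ((l.foldl (pvStepB (pvDistsFrom (edge_in.zip edge_out) edge_in.length 0)
            (edge_in.zip edge_out) edge_in.length) (bt, bc))).1 := by
  intro l
  induction l with
  | nil => intro t c bt bc h; exact h
  | cons a rest ih =>
    intro t c bt bc h
    simp only [List.foldl_cons]
    have hx := pvVal_rel edge_in edge_out hpre 0 a
    have hy := pvVal_rel edge_in edge_out hpre a a
    -- reduce the two steps to pairs whose first components are related
    rcases hA : pvStepA edge_in edge_out (t, c) a with ⟨t', c'⟩
    rcases hB : pvStepB (pvDistsFrom (edge_in.zip edge_out) edge_in.length 0)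
        (edge_in.zip edge_out) edge_in.length (bt, bc) a with ⟨bt', bc'⟩
    have ht' : t' = (pvStepA edge_in edge_out (t, c) a).1 := by rw [hA]
    have hbt' : bt' = (pvStepB (pvDistsFrom (edge_in.zip edge_out) edge_in.length 0)
        (edge_in.zip edge_out) edge_in.length (bt, bc) a).1 := by rw [hB]
    apply ih
    rw [ht', hbt']
    unfold pvStepA pvStepB
    simp only
    rcases hx with ⟨hx0, hxA⟩ | ⟨mx, hx0, hxA, hmx1, hmxn⟩
    · rw [hx0, hxA]
      simp only
      rw [if_neg (by push Not; intro h1; omega)]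
      exact h
    · rcases hy with ⟨hy0, hyA⟩ | ⟨my, hy0, hyA, hmy1, hmyn⟩
      · rw [hx0, hy0, hxA, hyA]
        simp only
        rw [if_neg (by simp)]
        exact h
      · rw [hx0, hy0, hxA, hyA]
        simp only
        have hyne : ¬ ((my : Int) = -1) := by omega
        have hx0le : (0 : Int) ≤ (mx : Int) := by positivity
        rcases h with ⟨hbt, htv⟩ | ⟨mb, hbt, htv, hmb1, hmbn⟩
        · subst htv
          rw [hbt]
          rw [if_pos ⟨hx0le, by omega, hyne⟩]
          exact .inr ⟨mx, rfl, rfl, hmx1, hmxn⟩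
        · subst htv
          rw [hbt]
          by_cases hlt : (mx : Int) < (mb : Int)
          · rw [if_pos ⟨hx0le, hlt, hyne⟩]
            simp only [if_pos hlt]
            exact .inr ⟨mx, rfl, rfl, hmx1, hmxn⟩
          · rw [if_neg (by push Not; intro _ h2; exact absurd h2 hlt)]
            simp only [if_neg hlt]
            exact .inr ⟨mb, rfl, rfl, hmb1, hmbn⟩

lemma pvFoldC (edge_in edge_out : List Int) (hpre : edge_in.length ≤ edge_out.length) :
    ∀ (l : List Int) (t c : Int) (bt bc : Option Int),
      pvRelV edge_in.length c bc →
      pvRelV edge_in.length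
        ((l.foldl (pvStepA edge_in edge_out) (t, c))).2
        ((l.foldl (pvStepB (pvDistsFrom (edge_in.zip edge_out) edge_in.length 0)
            (edge_in.zip edge_out) edge_in.length) (bt, bc))).2 := by
  intro l
  induction l with
  | nil => intro t c bt bc h; exact h
  | cons a rest ih =>
    intro t c bt bc h
    simp only [List.foldl_cons]
    have hx := pvVal_rel edge_in edge_out hpre 0 a
    have hy := pvVal_rel edge_in edge_out hpre a a
    rcases hA : pvStepA edge_in edge_out (t, c) a with ⟨t', c'⟩
    rcases hB : pvStepB (pvDistsFrom (edge_in.zip edge_out) edge_in.length 0)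
        (edge_in.zip edge_out) edge_in.length (bt, bc) a with ⟨bt', bc'⟩
    have hc' : c' = (pvStepA edge_in edge_out (t, c) a).2 := by rw [hA]
    have hbc' : bc' = (pvStepB (pvDistsFrom (edge_in.zip edge_out) edge_in.length 0)
        (edge_in.zip edge_out) edge_in.length (bt, bc) a).2 := by rw [hB]
    apply ih
    rw [hc', hbc']
    unfold pvStepA pvStepB
    simp only
    rcases hy with ⟨hy0, hyA⟩ | ⟨my, hy0, hyA, hmy1, hmyn⟩
    · rcases hx with ⟨hx0, hxA⟩ | ⟨mx, hx0, hxA, hmx1, hmxn⟩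
      · rw [hx0, hyA]
        simp only
        rw [if_neg (by push Not; intro h1; omega)]
        exact h
      · rw [hx0, hy0, hyA]
        simp only
        rw [if_neg (by push Not; intro h1; omega)]
        exact h
    · rcases hx with ⟨hx0, hxA⟩ | ⟨mx, hx0, hxA, hmx1, hmxn⟩
      · rw [hx0, hyA, hxA]
        simp only
        rw [if_neg (by simp)]
        exact h
      · rw [hx0, hy0, hyA, hxA]
        simp only
        have hxne : ¬ ((mx : Int) = -1) := by omega
        have hy0le : (0 : Int) ≤ (my : Int) := by positivity
        rcases h with ⟨hbc, hcv⟩ | ⟨mb, hbc, hcv, hmb1, hmbn⟩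
        · subst hcv
          rw [hbc]
          rw [if_pos ⟨hy0le, by omega, hxne⟩]
          exact .inr ⟨my, rfl, rfl, hmy1, hmyn⟩
        · subst hcv
          rw [hbc]
          by_cases hlt : (my : Int) < (mb : Int)
          · rw [if_pos ⟨hy0le, hlt, hxne⟩]
            simp only [if_pos hlt]
            exact .inr ⟨my, rfl, rfl, hmy1, hmyn⟩
          · rw [if_neg (by push Not; intro _ h2; exact absurd h2 hlt)]
            simp only [if_neg hlt]
            exact .inr ⟨mb, rfl, rfl, hmb1, hmbn⟩

lemma pvFinal_assembly (edge_in edge_out acc : List Int)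
    (hpre : edge_in.length ≤ edge_out.length) :
    get_minimal_distances_to_acc edge_in edge_out acc
      = get_minimal_distances_to_acc_alt edge_in edge_out acc := by
  rcases hstA : acc.foldl (pvStepA edge_in edge_out)
      ((if (0 : Int) ∈ acc then 0 else (edge_in.length : Int) + 1), (edge_in.length : Int) + 1)
    with ⟨tA, cA⟩
  rcases hstB : acc.foldl (pvStepB (pvDistsFrom (edge_in.zip edge_out) edge_in.length 0)
      (edge_in.zip edge_out) edge_in.length) ((none : Option Int), (none : Option Int))
    with ⟨bt, bc⟩
  have hAeq : get_minimal_distances_to_acc edge_in edge_out acc =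
      ((if tA = (edge_in.length : Int) + 1 then -1 else tA),
       (if cA = (edge_in.length : Int) + 1 then -1 else cA)) := by
    simp only [get_minimal_distances_to_acc, hstA]
  have hBeq : get_minimal_distances_to_acc_alt edge_in edge_out acc =
      ((if (0 : Int) ∈ acc then 0 else bt.getD (-1)), bc.getD (-1)) := by
    simp only [get_minimal_distances_to_acc_alt, hstB]
  rw [hAeq, hBeq]
  have hn1 : ((edge_in.length : Int) + 1) ≠ 0 := by positivity
  -- convert a RelV fact into equality of the published components
  have hconv : ∀ (v : Int) (bv : Option Int), pvRelV edge_in.length v bv →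
      (if v = (edge_in.length : Int) + 1 then -1 else v) = bv.getD (-1) := by
    rintro v bv (⟨hbv, hv⟩ | ⟨m, hbv, hv, hm1, hmn⟩)
    · subst hv; rw [if_pos rfl, hbv]; rfl
    · subst hv
      rw [if_neg (by omega), hbv]
      rfl
  have hC : pvRelV edge_in.length cA bc := by
    have := pvFoldC edge_in edge_out hpre acc
        (if (0 : Int) ∈ acc then 0 else (edge_in.length : Int) + 1)
        ((edge_in.length : Int) + 1) none none (.inl ⟨rfl, rfl⟩)
    rw [hstA, hstB] at this
    exact this
  refine Prod.ext ?_ ?_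
  · simp only
    by_cases h0 : (0 : Int) ∈ acc
    · rw [if_pos h0]
      have htA : tA = 0 := by
        have := pvFoldT0 edge_in edge_out acc ((edge_in.length : Int) + 1)
        rw [if_pos h0] at hstA
        rw [hstA] at this
        exact this
      rw [htA, if_neg (fun hc => hn1 hc.symm)]
    · rw [if_neg h0]
      have hT : pvRelV edge_in.length tA bt := by
        have := pvFoldT edge_in edge_out hpre acc
            (if (0 : Int) ∈ acc then 0 else (edge_in.length : Int) + 1)
            ((edge_in.length : Int) + 1) none none (by rw [if_neg h0]; exact .inl ⟨rfl, rfl⟩)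
        rw [hstA, hstB] at this
        exact this
      exact hconv tA bt hT
  · simp only
    exact hconv cA bc hC

-- with acc = [] neither side searches: both return (-1, -1)
lemma pvEmptyAcc (edge_in edge_out : List Int) :
    get_minimal_distances_to_acc edge_in edge_out [] =
      get_minimal_distances_to_acc_alt edge_in edge_out [] := by
  simp [get_minimal_distances_to_acc, get_minimal_distances_to_acc_alt]

-- ===== VERDICT (by name: the statement is the Claim_ definition above) =====
theorem get_minimal_distances_to_acc_spec : Claim_equal_get_minimal_distances_to_acc := by
  intro edge_in edge_out acc _ hpre
  rcases hpre with hpre | rfl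
  · exact pvFinal_assembly edge_in edge_out acc hpre
  · exact pvEmptyAcc edge_in edge_out
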